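-- pv_equiv track=rewrite | github.com/snoobysnoofy/python-assignments-solutions | week06/PPA10.py | busy_cities
-- ===== SOURCE A (Python) =====
-- def group_by_city(scores_dataset):
--     cities = {}
--     for entries in scores_dataset:
--         city = entries["City"]
--         name = entries["Name"]
--         if city not in cities:
--             cities[city] = []
--
--         cities[city].append(name)
--
--     return cities
--
-- def busy_cities(scores_dataset):
--     maxi = 0
--     busyc = []
--     cities = group_by_city(scores_dataset)
--     for city, students in cities.items():
--         if len(students) > maxi:
--             maxi = len(students)
--             busyc = [city]
--         elif len(students) == maxi:
--             busyc.append(city)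
--
--     return busyc
-- ===== SOURCE B (Python) =====
-- def busy_cities(scores_dataset):
--     counts = {}
--     for entries in scores_dataset:
--         city = entries["City"]
--         counts[city] = counts.get(city, 0) + 1
--     ranked = sorted(counts.items(), key=lambda kv: -kv[1])
--     return [city for city, c in ranked if c == ranked[0][1]]
-- ===== Notes on version B (the rewrite author's own statement) =====
-- stated objective: alternative
-- what changed: B replaces A's grouping of student names into per-city lists plus a running-max-with-reset selection loop by a per-city occurrence counter followed by a stable sort of (city,count) items on descending count, returning the tied prefix; B never reads the 'Name' field.
import Mathlib
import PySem

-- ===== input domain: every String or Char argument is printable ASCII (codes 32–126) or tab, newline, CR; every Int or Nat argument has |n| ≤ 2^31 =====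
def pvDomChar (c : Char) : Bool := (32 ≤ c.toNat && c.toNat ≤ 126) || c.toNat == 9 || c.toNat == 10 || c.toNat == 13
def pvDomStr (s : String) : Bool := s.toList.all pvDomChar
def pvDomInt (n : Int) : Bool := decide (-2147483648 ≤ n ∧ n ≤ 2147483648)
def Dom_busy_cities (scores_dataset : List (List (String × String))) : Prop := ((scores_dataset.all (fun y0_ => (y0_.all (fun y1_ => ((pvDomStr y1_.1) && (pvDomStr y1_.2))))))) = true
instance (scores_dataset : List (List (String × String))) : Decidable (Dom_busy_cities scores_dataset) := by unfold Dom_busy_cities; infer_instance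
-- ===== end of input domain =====

-- B counts entries per city and selects the winners by a stable sort on descending count
-- instead of A's per-city name lists plus a running-max-with-reset loop; same return value
-- wherever A returns.

-- ===== PORT A =====
-- entries["City"] / entries["Name"]: each record is a Python dict; KeyError (missing key) is excluded by Pre_
def pvCity (entries : List (String × String)) : String :=
  ((PySem.Dict.ofList entries).get? "City").getD ""
def pvName (entries : List (String × String)) : String :=
  ((PySem.Dict.ofList entries).get? "Name").getD ""

-- group_by_city: dict city -> list of names ('if city not in cities: cities[city]=[]' then append)
def group_by_city (scores_dataset : List (List (String × String))) : PySem.Dict String (List String) :=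
  scores_dataset.foldl (fun cities entries =>
    let city := pvCity entries
    let name := pvName entries
    let cities := if cities.contains city then cities else cities.insert city []
    cities.modify city [] (fun l => l ++ [name])) PySem.Dict.empty

def busy_cities (scores_dataset : List (List (String × String))) : List String :=
  ((group_by_city scores_dataset).items.foldl (fun (st : Int × List String) p =>
      if (p.2.length : Int) > st.1 then ((p.2.length : Int), [p.1])
      else if (p.2.length : Int) = st.1 then (st.1, st.2 ++ [p.1])
      else st) (0, ([] : List String))).2

-- ===== PORT B =====
def busy_cities_alt (scores_dataset : List (List (String × String))) : List String :=
  let counts : PySem.Dict String Int :=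
    scores_dataset.foldl (fun counts entries =>
      let city := pvCity entries
      counts.insert city (counts.getD city 0 + 1)) PySem.Dict.empty
  let ranked := PySem.List.sorted counts.items (fun kv => -kv.2) false
  -- '[city for city, c in ranked if c == ranked[0][1]]': with ranked = [] the guard
  -- (and ranked[0]) is never evaluated, so the comprehension is []
  match ranked with
  | [] => []
  | h :: _ => (ranked.filter (fun p => p.2 == h.2)).map (·.1)

-- ===== PRECONDITION & SPEC =====
-- Pre_ excludes exactly the datasets with an entry missing a "City" or "Name" key, on which A raises KeyError.
def Pre_busy_cities (scores_dataset : List (List (String × String))) : Prop :=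
  ∀ entries ∈ scores_dataset, "City" ∈ entries.map Prod.fst ∧ "Name" ∈ entries.map Prod.fst
instance (scores_dataset : List (List (String × String))) : Decidable (Pre_busy_cities scores_dataset) := by unfold Pre_busy_cities; infer_instance

def pvWitness_busy_cities : (List (List (String × String))) :=
  [[("City", "Pune"), ("Name", "Ann")], [("City", "Pune"), ("Name", "Bob")], [("City", "Oslo"), ("Name", "Cid")]]

def Spec_busy_cities (scores_dataset : List (List (String × String))) (out : List String) : Prop := out = busy_cities_alt scores_dataset
instance (scores_dataset : List (List (String × String))) (out : List String) : Decidable (Spec_busy_cities scores_dataset out) := by unfold Spec_busy_cities; infer_instance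

-- ===== CLAIM (what is proved, stated in full; the proofs are below) =====
def Claim_equal_busy_cities : Prop := ∀ (scores_dataset : List (List (String × String))), Dom_busy_cities scores_dataset → Pre_busy_cities scores_dataset → Spec_busy_cities scores_dataset (busy_cities scores_dataset)
-- ===== LEMMAS AND PROOFS =====

-- A's per-record update collapses to a single insert of the appended list
theorem stepG_eq (dG : PySem.Dict String (List String)) (city name : String) :
    ((if dG.contains city then dG else dG.insert city []).modify city [] (fun l => l ++ [name]))
      = dG.insert city (dG.getD city [] ++ [name]) := by
  by_cases h : dG.contains city
  · simp [h, PySem.Dict.modify]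
  · simp only [Bool.not_eq_true] at h
    simp [h, PySem.Dict.modify, PySem.Dict.getD_insert_self, PySem.Dict.insert_insert_self,
      PySem.Dict.getD_of_not_contains _ _ h]

theorem optlen_getD (o : Option (List String)) :
    (o.map (fun v => (v.length : Int))).getD 0 = ((o.getD []).length : Int) := by
  cases o <;> simp

-- loop invariant: B's counter has the same keys as A's groups dict and counts their lengths
theorem counts_rel (ds : List (List (String × String))) :
    ∀ (dG : PySem.Dict String (List String)) (dC : PySem.Dict String Int),
      dC.keys = dG.keys →
      (∀ c, dC.get? c = (dG.get? c).map (fun v => (v.length : Int))) →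
      (ds.foldl (fun counts entries =>
          counts.insert (pvCity entries) (counts.getD (pvCity entries) 0 + 1)) dC).keys
        = (ds.foldl (fun cities entries =>
          (if cities.contains (pvCity entries) then cities else cities.insert (pvCity entries) []).modify
            (pvCity entries) [] (fun l => l ++ [pvName entries])) dG).keys ∧
      (∀ c, (ds.foldl (fun counts entries =>
          counts.insert (pvCity entries) (counts.getD (pvCity entries) 0 + 1)) dC).get? c
        = ((ds.foldl (fun cities entries =>
          (if cities.contains (pvCity entries) then cities else cities.insert (pvCity entries) []).modify
            (pvCity entries) [] (fun l => l ++ [pvName entries])) dG).get? c).map (fun v => (v.length : Int))) := by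
  induction ds with
  | nil => intro dG dC hk hg; exact ⟨hk, hg⟩
  | cons e t ih =>
    intro dG dC hk hg
    simp only [List.foldl_cons]
    rw [stepG_eq]
    apply ih
    · have hcont : dC.contains (pvCity e) = dG.contains (pvCity e) := by
        rw [PySem.Dict.contains_eq_isSome_get?, PySem.Dict.contains_eq_isSome_get?, hg]
        cases dG.get? (pvCity e) <;> simp
      by_cases h : dG.contains (pvCity e) = true
      · rw [PySem.Dict.keys_insert_of_contains _ _ (hcont.trans h),
          PySem.Dict.keys_insert_of_contains _ _ h, hk]
      · simp only [Bool.not_eq_true] at h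
        rw [PySem.Dict.keys_insert_of_not_contains _ _ (hcont.trans h),
          PySem.Dict.keys_insert_of_not_contains _ _ h, hk]
    · intro c
      rw [PySem.Dict.get?_insert, PySem.Dict.get?_insert]
      by_cases hc : c = pvCity e
      · simp only [hc]
        rw [PySem.Dict.getD_eq_get?_getD, PySem.Dict.getD_eq_get?_getD, hg, optlen_getD]
        simp
      · simp only [if_neg hc]
        exact hg c

-- every count B stores is at least 1
theorem counts_pos (ds : List (List (String × String))) :
    ∀ (dC : PySem.Dict String Int), (∀ p ∈ dC.items, 1 ≤ p.2) →
      ∀ p ∈ (ds.foldl (fun counts entries =>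
          counts.insert (pvCity entries) (counts.getD (pvCity entries) 0 + 1)) dC).items, 1 ≤ p.2 := by
  induction ds with
  | nil => intro dC h; exact h
  | cons e t ih =>
    intro dC h
    simp only [List.foldl_cons]
    apply ih
    intro p hp
    rcases (PySem.Dict.mem_items_insert _ _ _ _).1 hp with h1 | h2
    · subst h1
      have : 0 ≤ dC.getD (pvCity e) 0 := by
        rw [PySem.Dict.getD_eq_get?_getD]
        cases hx : dC.get? (pvCity e) with
        | none => simp
        | some v =>
          have := h _ (PySem.Dict.mem_items_of_get?_eq_some dC hx)
          simp only [Option.getD_some]; omega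
      simp only []; omega
    · exact h p h2.1

-- stable insertion preserves each key-class subsequence (class of the inserted key gains x at the end)
theorem filter_insertBy {α κ : Type} [LinearOrder κ] (key : α → κ) (x : α) (ys : List α) (c : κ)
    (hys : ys.Pairwise (fun a b => key a ≤ key b)) :
    (PySem.List.insertBy (fun a b => decide (key a < key b)) x ys).filter (fun a => key a == c)
      = ys.filter (fun a => key a == c) ++ (if key x == c then [x] else []) := by
  induction ys with
  | nil => cases h : key x == c <;> simp [PySem.List.insertBy, List.filter, h]
  | cons y t ih =>
    rcases List.pairwise_cons.1 hys with ⟨hy, ht⟩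
    by_cases hlt : key x < key y
    · simp only [PySem.List.insertBy, decide_eq_true_eq, if_pos hlt]
      by_cases hxc : key x = c
      · have hnil : (y :: t).filter (fun a => key a == c) = [] := by
          rw [List.filter_eq_nil_iff]
          intro a ha
          have hya : key y ≤ key a := by
            rcases List.mem_cons.1 ha with h | h
            · exact le_of_eq (by rw [h])
            · exact hy a h
          simp only [beq_iff_eq]
          intro hac
          rw [hxc, ← hac] at hlt
          exact absurd hlt (not_lt.2 hya)
        rw [List.filter_cons_of_pos (by simp [hxc]), hnil]
        simp [show (key x == c) = true by simp [hxc]]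
      · rw [List.filter_cons_of_neg (by simp [hxc])]
        simp [show (key x == c) = false by simp [hxc]]
    · simp only [PySem.List.insertBy, decide_eq_true_eq, if_neg hlt]
      rw [List.filter_cons, List.filter_cons, ih ht]
      by_cases hyc : key y = c <;> simp [hyc]

-- a stable sort preserves each key-class subsequence
theorem filter_sorted {α κ : Type} [LinearOrder κ] (xs : List α) (key : α → κ) (c : κ) :
    (PySem.List.sorted xs key false).filter (fun a => key a == c)
      = xs.filter (fun a => key a == c) := by
  induction xs using List.reverseRecOn with
  | nil => simp [PySem.List.sorted]
  | append_singleton l x ih =>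
    have hstep : PySem.List.sorted (l ++ [x]) key false
        = PySem.List.insertBy (fun a b => decide (key a < key b)) x (PySem.List.sorted l key false) := by
      rw [PySem.List.sorted_eq_foldl_insertBy, PySem.List.sorted_eq_foldl_insertBy, List.foldl_append]
      simp
    rw [hstep, filter_insertBy key x _ c (PySem.List.sorted_pairwise l key), ih,
      List.filter_append]
    cases h : key x == c <;> simp [List.filter, h]

-- A's running-max-with-reset loop computes (max, argmax keys in order)
theorem sel_eq (l : List (String × List String)) :
    (l.foldl (fun (st : Int × List String) p =>
      if (p.2.length : Int) > st.1 then ((p.2.length : Int), [p.1])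
      else if (p.2.length : Int) = st.1 then (st.1, st.2 ++ [p.1])
      else st) (0, ([] : List String)))
    = (l.foldl (fun m p => max m (p.2.length : Int)) 0,
       (l.filter (fun p => (p.2.length : Int) == l.foldl (fun m p => max m (p.2.length : Int)) 0)).map (·.1)) := by
  induction l using List.reverseRecOn with
  | nil => simp
  | append_singleton l x ih =>
    have hbound := (PySem.List.le_foldl_max_int l (fun p => (p.2.length : Int)) 0).2
    rw [List.foldl_append, ih, List.foldl_append]
    by_cases h1 : (x.2.length : Int) > l.foldl (fun m p => max m (p.2.length : Int)) 0
    · have hmax : max (l.foldl (fun m p => max m (p.2.length : Int)) 0) (x.2.length : Int) = (x.2.length : Int) := by omega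
      have hfil : l.filter (fun p => (p.2.length : Int) == (x.2.length : Int)) = [] := by
        rw [List.filter_eq_nil_iff]
        intro p hp
        have := hbound p hp
        simp only [beq_iff_eq]
        omega
      simp [List.foldl, h1, hmax, List.filter_append, hfil]
    · by_cases h2 : (x.2.length : Int) = l.foldl (fun m p => max m (p.2.length : Int)) 0
      · have hmax : max (l.foldl (fun m p => max m (p.2.length : Int)) 0) (x.2.length : Int) = l.foldl (fun m p => max m (p.2.length : Int)) 0 := by omega
        simp [List.foldl, h2, List.filter_append]
      · have hmax : max (l.foldl (fun m p => max m (p.2.length : Int)) 0) (x.2.length : Int) = l.foldl (fun m p => max m (p.2.length : Int)) 0 := by omega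
        simp [List.foldl, h1, h2, List.filter_append, hmax]

-- B's counter items are A's group items with each name list replaced by its length
theorem items_rel (ds : List (List (String × String))) :
    (ds.foldl (fun (counts : PySem.Dict String Int) entries =>
        counts.insert (pvCity entries) (counts.getD (pvCity entries) 0 + 1)) PySem.Dict.empty).items
      = (group_by_city ds).items.map (fun p => (p.1, (p.2.length : Int))) := by
  have hGB : group_by_city ds = ds.foldl (fun cities entries =>
      (if cities.contains (pvCity entries) then cities else cities.insert (pvCity entries) []).modify
        (pvCity entries) [] (fun l => l ++ [pvName entries])) PySem.Dict.empty := rfl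
  obtain ⟨hk, hg⟩ := counts_rel ds PySem.Dict.empty PySem.Dict.empty (by rfl) (by intro c; rfl)
  have hndC : (ds.foldl (fun (counts : PySem.Dict String Int) entries =>
        counts.insert (pvCity entries) (counts.getD (pvCity entries) 0 + 1)) PySem.Dict.empty).keys.Nodup :=
    PySem.Dict.nodup_keys_foldl_insert_key ds (fun e => pvCity e)
      (fun (d : PySem.Dict String Int) e => d.getD (pvCity e) 0 + 1) PySem.Dict.empty (by simp)
  have hndG : (group_by_city ds).keys.Nodup := by rw [hGB, ← hk]; exact hndC
  rw [PySem.Dict.items_eq_map_keys _ hndC 0,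
      PySem.Dict.items_eq_map_keys (group_by_city ds) hndG [], List.map_map, hGB, ← hk]
  apply List.map_congr_left
  intro k _
  simp only [Function.comp]
  congr 1
  rw [PySem.Dict.getD_eq_get?_getD, PySem.Dict.getD_eq_get?_getD, hg k, ← hGB, optlen_getD]

-- ===== VERDICT (by name: the statement is the Claim_ definition above) =====
theorem busy_cities_spec : Claim_equal_busy_cities := by
  intro ds _ _
  unfold Spec_busy_cities
  have hpos : ∀ p ∈ (ds.foldl (fun (counts : PySem.Dict String Int) entries =>
      counts.insert (pvCity entries) (counts.getD (pvCity entries) 0 + 1)) PySem.Dict.empty).items, 1 ≤ p.2 :=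
    counts_pos ds PySem.Dict.empty (by intro p hp; simp [PySem.Dict.empty] at hp)
  rw [items_rel] at hpos
  have halt : busy_cities_alt ds =
      (match PySem.List.sorted ((ds.foldl (fun (counts : PySem.Dict String Int) entries =>
          counts.insert (pvCity entries) (counts.getD (pvCity entries) 0 + 1)) PySem.Dict.empty).items)
          (fun kv => -kv.2) false with
       | [] => []
       | h :: _ => ((PySem.List.sorted ((ds.foldl (fun (counts : PySem.Dict String Int) entries =>
          counts.insert (pvCity entries) (counts.getD (pvCity entries) 0 + 1)) PySem.Dict.empty).items)
          (fun kv => -kv.2) false).filter (fun p => p.2 == h.2)).map (·.1)) := rfl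
  rw [items_rel] at halt
  rw [halt]
  unfold busy_cities
  rw [sel_eq]
  simp only []
  cases hr : PySem.List.sorted ((group_by_city ds).items.map (fun p => (p.1, (p.2.length : Int))))
      (fun kv => -kv.2) false with
  | nil =>
    have : (group_by_city ds).items.map (fun p => (p.1, (p.2.length : Int))) = [] :=
      (PySem.List.sorted_eq_nil_iff _ _ _).1 hr
    have hlnil : (group_by_city ds).items = [] := List.map_eq_nil_iff.1 this
    simp [hlnil]
  | cons h t =>
    -- the head of the descending sort carries the maximal count
    have hmem : h ∈ (group_by_city ds).items.map (fun p => (p.1, (p.2.length : Int))) :=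
      (PySem.List.mem_sorted _ _ _ _).1 (hr ▸ List.mem_cons_self)
    have hub : ∀ y ∈ (group_by_city ds).items.map (fun p => (p.1, (p.2.length : Int))), y.2 ≤ h.2 := by
      intro y hy
      have := PySem.List.key_head_sorted_le _ (fun kv => -kv.2) hr y hy
      dsimp only at this
      omega
    have hMub := (PySem.List.le_foldl_max_int
      ((group_by_city ds).items.map (fun p => (p.1, (p.2.length : Int)))) (fun p => p.2) 0).2
    have hM : h.2 = (group_by_city ds).items.foldl (fun m p => max m (p.2.length : Int)) 0 := by
      set L := (group_by_city ds).items.map (fun p => (p.1, (p.2.length : Int))) with hL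
      have h1 : h.2 ≤ L.foldl (fun m p => max m p.2) 0 := hMub h hmem
      have hfm : (L.map (fun p => p.2)).foldl max 0 = L.foldl (fun m p => max m p.2) 0 := by
        rw [List.foldl_map]
      have hf2 : L.foldl (fun m p => max m p.2) 0
          = (group_by_city ds).items.foldl (fun m p => max m (p.2.length : Int)) 0 := by
        rw [hL, List.foldl_map]
      rcases PySem.List.foldl_max_mem (L.map (fun p => p.2)) (0 : Int) with h0 | hmem2
      · have hp1 : 1 ≤ h.2 := hpos h hmem
        omega
      · obtain ⟨y, hy, hy2⟩ := List.mem_map.1 hmem2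
        have h2 := hub y hy
        omega
    -- stable sort preserves the maximal key-class in input order
    have hclass : (PySem.List.sorted ((group_by_city ds).items.map (fun p => (p.1, (p.2.length : Int))))
          (fun kv => -kv.2) false).filter (fun p => p.2 == h.2)
        = ((group_by_city ds).items.map (fun p => (p.1, (p.2.length : Int)))).filter
          (fun p => p.2 == h.2) := by
      have e1 : ∀ (L : List (String × Int)), L.filter (fun p => p.2 == h.2)
          = L.filter (fun (p : String × Int) => (-p.2 : Int) == -h.2) := by
        intro L
        apply List.filter_congr
        intro a _
        rcases eq_or_ne a.2 h.2 with hq | hq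
        · simp [hq]
        · rw [beq_eq_false_iff_ne.2 hq, beq_eq_false_iff_ne.2 (show (-a.2 : Int) ≠ -h.2 by omega)]
      rw [e1, e1 ((group_by_city ds).items.map (fun p => (p.1, (p.2.length : Int)))),
        filter_sorted]
    rw [hr] at hclass
    simp only [hclass]
    rw [hM, List.filter_map, List.map_map]
    rfl
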